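-- pv_equiv track=rewrite | github.com/gautamsw5/Hackerrank-Project-Euler-Plus | 51 Prime digit replacement/letsgo.py | check
-- ===== SOURCE A (Python) =====
-- def check(n):
--     dct={}
--     for i in str(n):
--         if i in dct:
--             dct[i]+=1
--             if dct[i]==3:
--                 return True
--         else:
--             dct[i]=1
--     return False
-- ===== SOURCE B (Python) =====
-- def check(n):
--     prev = None
--     run = 0
--     for c in sorted(str(n)):
--         if c == prev:
--             run += 1
--             if run == 3:
--                 return True
--         else:
--             prev = c
--             run = 1
--     return False
-- ===== Notes on version B (the rewrite author's own statement) =====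
-- stated objective: alternative
-- what changed: Replaces the frequency-dictionary loop with sort-then-scan: B sorts the digit string and makes a single pass maintaining a run-length counter, returning True when a run reaches 3.
import Mathlib
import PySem

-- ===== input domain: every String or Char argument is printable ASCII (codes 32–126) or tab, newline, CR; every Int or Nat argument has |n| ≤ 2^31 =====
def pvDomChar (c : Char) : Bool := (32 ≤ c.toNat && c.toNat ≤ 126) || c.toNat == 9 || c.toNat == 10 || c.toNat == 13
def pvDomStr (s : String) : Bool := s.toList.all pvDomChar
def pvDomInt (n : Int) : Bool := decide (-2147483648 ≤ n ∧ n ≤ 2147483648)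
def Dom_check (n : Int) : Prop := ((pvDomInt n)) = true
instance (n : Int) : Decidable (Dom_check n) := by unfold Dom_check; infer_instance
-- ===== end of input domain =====

-- B replaces A's frequency dictionary with sort-then-scan for a run of 3; same return value everywhere (alternative decomposition, no speed claim).

-- ===== PORT A =====
-- literal port of A's loop: dict of counts, early return when a count reaches 3
def aLoop (d : PySem.Dict Char Int) : List Char → Bool
  | [] => false
  | c :: cs =>
    if d.contains c then
      let d' := d.insert c (d.getD c 0 + 1)
      if d'.getD c 0 == 3 then true else aLoop d' cs
    else aLoop (d.insert c 1) cs

def check (n : Int) : Bool := aLoop PySem.Dict.empty (PySem.Int.toChars n)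

-- ===== PORT B =====
-- literal port of B's loop: scan sorted(str(n)) with a run-length counter
def bLoop (prev : Option Char) (run : Nat) : List Char → Bool
  | [] => false
  | c :: cs =>
    if some c == prev then
      if run + 1 == 3 then true else bLoop prev (run + 1) cs
    else bLoop (some c) 1 cs

def check_alt (n : Int) : Bool :=
  bLoop none 0 (PySem.List.sorted (PySem.Int.toChars n) (fun x => x) false)

-- ===== PRECONDITION & SPEC =====
def Spec_check (n : Int) (out : Bool) : Prop := out = check_alt n
instance (n : Int) (out : Bool) : Decidable (Spec_check n out) := by unfold Spec_check; infer_instance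

-- ===== CLAIM (what is proved, stated in full; the proofs are below) =====
def Claim_equal_check : Prop := ∀ (n : Int), Dom_check n → Spec_check n (check n)

-- ===== LEMMAS AND PROOFS =====

-- count over a cons with a different head
theorem count_cons_ne {x c : Char} (h : x ≠ c) (cs : List Char) :
    (c :: cs).count x = cs.count x := by
  simp [h.symm]

-- A's loop returns true iff some character's dict count plus remaining occurrences reaches 3
theorem aLoop_iff (l : List Char) : ∀ (d : PySem.Dict Char Int),
    (∀ x, d.contains x = true → 1 ≤ d.getD x 0 ∧ d.getD x 0 ≤ 2) →
    (aLoop d l = true ↔ ∃ x, 3 ≤ d.getD x 0 + (l.count x : Int)) := by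
  induction l with
  | nil =>
    intro d hinv
    simp only [aLoop, List.count_nil]
    constructor
    · intro h; cases h
    · rintro ⟨x, hx⟩
      by_cases hc : d.contains x = true
      · have := (hinv x hc).2; omega
      · have : d.getD x 0 = 0 := PySem.Dict.getD_of_not_contains d 0 (by simpa using hc)
        omega
  | cons c cs ih =>
    intro d hinv
    by_cases hc : d.contains c = true
    · have hv := hinv c hc
      simp only [aLoop, hc, if_true]
      rw [PySem.Dict.getD_insert_self]
      by_cases h3 : d.getD c 0 + 1 = 3
      · simp only [h3]
        constructor
        · intro _
          exact ⟨c, by simp [List.count_cons_self]; omega⟩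
        · intro _; rfl
      · have hne : ((d.getD c 0 + 1 : Int) == 3) = false := by
          simp [h3]
        simp only [hne, Bool.false_eq_true, if_false]
        rw [ih]
        · constructor
          · rintro ⟨x, hx⟩
            refine ⟨x, ?_⟩
            rw [PySem.Dict.getD_insert] at hx
            by_cases hxc : x = c
            · subst hxc; simp only [if_true] at hx
              simp [List.count_cons_self]; omega
            · simp only [hxc, if_false] at hx
              rw [count_cons_ne hxc]; omega
          · rintro ⟨x, hx⟩
            refine ⟨x, ?_⟩
            rw [PySem.Dict.getD_insert]
            by_cases hxc : x = c
            · subst hxc; simp only [if_true]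
              rw [List.count_cons_self] at hx; push_cast at hx ⊢; omega
            · simp only [hxc, if_false]
              rw [count_cons_ne hxc] at hx; omega
        · intro x hx
          rw [PySem.Dict.contains_insert] at hx
          rw [PySem.Dict.getD_insert]
          by_cases hxc : x = c
          · subst hxc; simp only [if_true]; omega
          · simp only [hxc, if_false]
            apply hinv
            simpa [hxc] using hx
    · have hz : d.getD c 0 = 0 := PySem.Dict.getD_of_not_contains d 0 (by simpa using hc)
      simp only [aLoop, hc, Bool.false_eq_true, if_false]
      rw [ih]
      · constructor
        · rintro ⟨x, hx⟩
          refine ⟨x, ?_⟩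
          rw [PySem.Dict.getD_insert] at hx
          by_cases hxc : x = c
          · subst hxc; simp only [if_true] at hx
            rw [List.count_cons_self]; push_cast; omega
          · simp only [hxc, if_false] at hx
            rw [count_cons_ne hxc]; omega
        · rintro ⟨x, hx⟩
          refine ⟨x, ?_⟩
          rw [PySem.Dict.getD_insert]
          by_cases hxc : x = c
          · subst hxc; simp only [if_true]
            rw [List.count_cons_self] at hx; push_cast at hx ⊢; omega
          · simp only [hxc, if_false]
            rw [count_cons_ne hxc] at hx; omega
      · intro x hx
        rw [PySem.Dict.contains_insert] at hx
        rw [PySem.Dict.getD_insert]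
        by_cases hxc : x = c
        · subst hxc; simp only [if_true]; omega
        · simp only [hxc, if_false]
          apply hinv
          simpa [hxc] using hx

-- B's scan on a sorted tail: true iff the pending run completes or some later char repeats 3×
theorem bLoop_iff (l : List Char) : ∀ (p : Char) (run : Nat),
    l.Pairwise (· ≤ ·) → (∀ c ∈ l, p ≤ c) → 1 ≤ run → run ≤ 2 →
    (bLoop (some p) run l = true ↔
      (3 ≤ run + l.count p ∨ ∃ c, c ≠ p ∧ 3 ≤ l.count c)) := by
  induction l with
  | nil =>
    intro p run _ _ _ h2
    simp only [bLoop, List.count_nil]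
    constructor
    · intro h; cases h
    · rintro (h | ⟨c, _, hc⟩) <;> omega
  | cons c cs ih =>
    intro p run hs hp h1 h2
    have hpc : p ≤ c := hp c (List.mem_cons_self ..)
    have hcs : ∀ x ∈ cs, c ≤ x := by
      intro x hx; exact (List.pairwise_cons.mp hs).1 x hx
    have hs' : cs.Pairwise (· ≤ ·) := (List.pairwise_cons.mp hs).2
    by_cases hcp : c = p
    · subst hcp
      simp only [bLoop, beq_self_eq_true, if_true]
      by_cases h3 : run + 1 = 3
      · simp only [h3]
        constructor
        · intro _
          left; rw [List.count_cons_self]; omega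
        · intro _; rfl
      · have hne : ((run + 1 : Nat) == 3) = false := by simp only [beq_eq_false_iff_ne, ne_eq]; omega
        simp only [hne, Bool.false_eq_true, if_false]
        rw [ih c (run + 1) hs' hcs (by omega) (by omega)]
        rw [List.count_cons_self]
        constructor
        · rintro (h | ⟨x, hx, h⟩)
          · left; omega
          · right; exact ⟨x, hx, by rw [count_cons_ne hx]; omega⟩
        · rintro (h | ⟨x, hx, h⟩)
          · left; omega
          · right; refine ⟨x, hx, ?_⟩; rw [count_cons_ne hx] at h; omega
    · have hplt : p < c := lt_of_le_of_ne hpc (fun h => hcp h.symm)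
      have hpnot : p ∉ c :: cs := by
        intro hmem
        rcases List.mem_cons.mp hmem with h | h
        · exact hcp h.symm
        · exact absurd (hcs p h) (not_le.mpr hplt)
      have hcount0 : (c :: cs).count p = 0 := List.count_eq_zero_of_not_mem hpnot
      have hbe : ((some c : Option Char) == some p) = false := by
        simp [hcp]
      simp only [bLoop, hbe, Bool.false_eq_true, if_false]
      rw [ih c 1 hs' hcs (by omega) (by omega)]
      constructor
      · rintro (h | ⟨x, hx, h⟩)
        · right
          refine ⟨c, fun he => hcp he, ?_⟩
          rw [List.count_cons_self]; omega
        · right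
          refine ⟨x, ?_, ?_⟩
          · intro he; subst he
            have : x ∈ cs := List.count_pos_iff.mp (by omega)
            exact absurd (hcs x this) (not_le.mpr hplt)
          · rw [count_cons_ne hx]; omega
      · rintro (h | ⟨x, hxp, h⟩)
        · rw [hcount0] at h; omega
        · by_cases hxc : x = c
          · subst hxc; left; rw [List.count_cons_self] at h; omega
          · right
            refine ⟨x, hxc, ?_⟩
            rw [count_cons_ne hxc] at h; omega

-- B's full scan on a sorted list: true iff some character occurs at least 3 times
theorem bLoop_top (l : List Char) (hs : l.Pairwise (· ≤ ·)) :
    bLoop none 0 l = true ↔ ∃ x, 3 ≤ l.count x := by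
  cases l with
  | nil =>
    simp only [bLoop, List.count_nil]
    constructor
    · intro h; cases h
    · rintro ⟨x, hx⟩; omega
  | cons c cs =>
    have hcs : ∀ x ∈ cs, c ≤ x := by
      intro x hx; exact (List.pairwise_cons.mp hs).1 x hx
    have hs' : cs.Pairwise (· ≤ ·) := (List.pairwise_cons.mp hs).2
    simp only [bLoop, Bool.false_eq_true, if_false, show ((some c : Option Char) == none) = false from rfl]
    rw [bLoop_iff cs c 1 hs' hcs (by omega) (by omega)]
    constructor
    · rintro (h | ⟨x, hx, h⟩)
      · exact ⟨c, by rw [List.count_cons_self]; omega⟩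
      · exact ⟨x, by rw [count_cons_ne hx]; omega⟩
    · rintro ⟨x, hx⟩
      by_cases hxc : x = c
      · subst hxc; left; rw [List.count_cons_self] at hx; omega
      · right; refine ⟨x, hxc, ?_⟩; rw [count_cons_ne hxc] at hx; omega

-- ===== VERDICT (by name: the statement is the Claim_ definition above) =====
theorem check_spec : Claim_equal_check := by
  intro n _
  unfold Spec_check check check_alt
  set l := PySem.Int.toChars n with hl
  set s := PySem.List.sorted l (fun x => x) false with hsdef
  have hperm : s.Perm l := PySem.List.sorted_perm l (fun x => x) false
  have hpair : s.Pairwise (· ≤ ·) := PySem.List.sorted_pairwise l (fun x => x)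
  rw [Bool.eq_iff_iff]
  rw [aLoop_iff l PySem.Dict.empty (by intro x hx; simp [PySem.Dict.contains_empty] at hx)]
  rw [bLoop_top s hpair]
  constructor
  · rintro ⟨x, hx⟩
    refine ⟨x, ?_⟩
    rw [hperm.count_eq]
    simp [PySem.Dict.getD_empty] at hx
    omega
  · rintro ⟨x, hx⟩
    refine ⟨x, ?_⟩
    rw [hperm.count_eq] at hx
    simp [PySem.Dict.getD_empty]
    omega
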